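-- pv_equiv track=rewrite | github.com/AlisaVasova/SimplexAlgorithm | Simplex Algorithm/decision.py | ved_stolbec
-- ===== SOURCE A (Python) =====
-- def ved_stolbec(delts, n):
--     max = 0
--     ved_st = -1
--     for i in range(1, n + 1):
--         if delts[i - 1] > max:
--             max = delts[i - 1]
--             ved_st = i
--
--     return ved_st
-- ===== SOURCE B (Python) =====
-- def ved_stolbec(delts, n):
--     vals = [delts[i - 1] for i in range(1, n + 1)]
--     m = max(vals, default=0)
--     return vals.index(m) + 1 if m > 0 else -1
-- ===== Notes on version B (the rewrite author's own statement) =====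
-- stated objective: idiomatic
-- what changed: Replaces the single running-max/index accumulator loop by a build-then-scan decomposition: materialise the scanned values, take max(..., default=0), and locate its first occurrence with list.index.
import Mathlib
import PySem

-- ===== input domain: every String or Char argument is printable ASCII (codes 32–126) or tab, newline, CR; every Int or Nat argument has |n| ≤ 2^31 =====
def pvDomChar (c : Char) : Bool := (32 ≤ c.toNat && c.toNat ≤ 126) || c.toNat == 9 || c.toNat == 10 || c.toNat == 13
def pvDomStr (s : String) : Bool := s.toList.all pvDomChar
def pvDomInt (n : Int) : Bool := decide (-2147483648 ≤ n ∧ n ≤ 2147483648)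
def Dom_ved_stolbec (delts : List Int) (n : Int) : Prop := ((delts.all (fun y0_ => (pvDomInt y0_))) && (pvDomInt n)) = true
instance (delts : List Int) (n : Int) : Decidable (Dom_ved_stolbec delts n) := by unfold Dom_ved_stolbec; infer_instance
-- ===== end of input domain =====

-- B replaces A's running-max/index accumulator loop by a build-then-scan decomposition
-- (materialise the values, take the max with default 0, find its first index); same cost, more idiomatic.


-- ===== PORT A =====
-- for i in range(1, n+1): if delts[i-1] > max: max = delts[i-1]; ved_st = i
-- delts[i-1] is ported as pyGetD with default 0; Pre_ guarantees the index is in range.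
def ved_stolbec (delts : List Int) (n : Int) : Int :=
  ((PySem.List.pyRange 1 (n + 1) 1).foldl
    (fun s i =>
      if PySem.List.pyGetD delts (i - 1) 0 > s.1 then (PySem.List.pyGetD delts (i - 1) 0, i)
      else s)
    (0, -1)).2

-- ===== PORT B =====
-- vals = [delts[i-1] for i in range(1, n+1)]; m = max(vals, default=0);
-- return vals.index(m) + 1 if m > 0 else -1
-- delts[i-1] ported as pyGetD (in range under Pre_); vals.index(m) via index? (m ∈ vals when m > 0).
def ved_stolbec_alt (delts : List Int) (n : Int) : Int :=
  let vals := (PySem.List.pyRange 1 (n + 1) 1).map (fun i => PySem.List.pyGetD delts (i - 1) 0)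
  let m := (PySem.List.max? vals (fun x => x)).getD 0
  if m > 0 then ((PySem.List.index? vals m).getD 0 : Int) + 1 else -1

-- ===== PRECONDITION & SPEC =====
-- Pre_ excludes exactly the inputs where Python A raises IndexError: n > len(delts).
def Pre_ved_stolbec (delts : List Int) (n : Int) : Prop := n ≤ (delts.length : Int)
instance (delts : List Int) (n : Int) : Decidable (Pre_ved_stolbec delts n) := by
  unfold Pre_ved_stolbec; infer_instance

def pvWitness_ved_stolbec : List Int × Int := ([3, -1, 7, 7, 2], 4)

def Spec_ved_stolbec (delts : List Int) (n : Int) (out : Int) : Prop := out = ved_stolbec_alt delts n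
instance (delts : List Int) (n : Int) (out : Int) : Decidable (Spec_ved_stolbec delts n out) := by
  unfold Spec_ved_stolbec; infer_instance

-- ===== CLAIM (what is proved, stated in full; the proofs are below) =====
def Claim_equal_ved_stolbec : Prop := ∀ (delts : List Int) (n : Int), Dom_ved_stolbec delts n → Pre_ved_stolbec delts n → Spec_ved_stolbec delts n (ved_stolbec delts n)

-- ===== LEMMAS AND PROOFS =====

theorem foldl_max_init (x y : Int) (l : List Int) :
    l.foldl max (max x y) = max x (l.foldl max y) := by
  induction l generalizing y with
  | nil => simp
  | cons h t ih =>
      simp only [List.foldl_cons]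
      rw [max_assoc, ih]

theorem loopA_char (g : Int → Int) (b : Int) :
    ∀ (k : Nat) (a : Int), (b - a).toNat = k → ∀ (m v : Int),
      ((PySem.List.pyRange a b 1).foldl
        (fun s i => if g i > s.1 then (g i, i) else s) (m, v)).2 =
      (match PySem.List.max? ((PySem.List.pyRange a b 1).map g) (fun x => x) with
       | none => v
       | some M => if M > m then a + ((PySem.List.index? ((PySem.List.pyRange a b 1).map g) M).getD 0 : Int) else v) := by
  intro k
  induction k with
  | zero =>
      intro a hk m v
      rw [PySem.List.pyRange_one_eq_nil (by omega)]
      simp [PySem.List.max?]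
  | succ k ih =>
      intro a hk m v
      have hab : a < b := by omega
      rw [PySem.List.pyRange_one_cons hab]
      simp only [List.foldl_cons, List.map_cons]
      have ih' := ih (a + 1) (by omega)
      rcases hvs : (PySem.List.pyRange (a+1) b 1).map g with _ | ⟨h, t⟩
      all_goals rw [← hvs]
      · -- tail empty
        have hr : PySem.List.pyRange (a+1) b 1 = [] := by
          cases hr2 : PySem.List.pyRange (a+1) b 1 with
          | nil => rfl
          | cons x xs => rw [hr2] at hvs; simp at hvs
        rw [hr]
        simp only [List.map_nil, List.foldl_nil]
        have hsing : PySem.List.max? (g a :: ([] : List Int)) (fun x => x) = some (g a) := by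
          have := PySem.List.max?_id_cons (g a) ([] : List Int)
          simpa using this
        rw [hsing]
        simp only
        by_cases hga : g a > m
        · rw [if_pos hga, if_pos hga, PySem.List.index?_cons_self]
          simp
        · rw [if_neg hga, if_neg hga]
      · -- tail nonempty
        have hmax' : PySem.List.max? ((PySem.List.pyRange (a+1) b 1).map g) (fun x => x) = some (t.foldl max h) := by
          rw [hvs]; exact PySem.List.max?_id_cons h t
        set M' := t.foldl max h with hM'
        have hmem : M' ∈ (PySem.List.pyRange (a+1) b 1).map g :=
          PySem.List.max?_mem hmax'
        have hcons : PySem.List.max? (g a :: (PySem.List.pyRange (a+1) b 1).map g) (fun x => x)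
            = some (max (g a) M') := by
          rw [hvs, PySem.List.max?_id_cons]
          rw [show (h :: t).foldl max (g a) = max (g a) M' from by
            simp only [List.foldl_cons]
            rw [show max (g a) h = max (g a) h from rfl]
            rw [← foldl_max_init (g a) h t]]
        rw [hcons]
        simp only
        by_cases hga : g a > m
        · rw [if_pos hga]
          rw [ih' _ _]
          rw [hmax']
          simp only
          by_cases hMg : M' > g a
          · rw [if_pos hMg, if_pos (by omega : max (g a) M' > m)]
            have hne : g a ≠ max (g a) M' := by omega
            have hmaxeq : max (g a) M' = M' := by omega
            rw [hmaxeq]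
            rw [PySem.List.index?_cons_of_ne _ (by omega : g a ≠ M')]
            obtain ⟨j, hj⟩ : ∃ j, PySem.List.index? ((PySem.List.pyRange (a+1) b 1).map g) M' = some j := by
              have := (PySem.List.index?_isSome_iff (xs := (PySem.List.pyRange (a+1) b 1).map g) (v := M')).mpr hmem
              exact Option.isSome_iff_exists.mp this
            rw [hj]
            simp
            omega
          · rw [if_neg hMg, if_pos (by omega : max (g a) M' > m)]
            have hmaxeq : max (g a) M' = g a := by omega
            rw [hmaxeq, PySem.List.index?_cons_self]
            simp
        · rw [if_neg hga]
          rw [ih' _ _]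
          rw [hmax']
          simp only
          by_cases hMm : M' > m
          · rw [if_pos hMm, if_pos (by omega : max (g a) M' > m)]
            have hmaxeq : max (g a) M' = M' := by omega
            rw [hmaxeq]
            rw [PySem.List.index?_cons_of_ne _ (by omega : g a ≠ M')]
            obtain ⟨j, hj⟩ : ∃ j, PySem.List.index? ((PySem.List.pyRange (a+1) b 1).map g) M' = some j := by
              have := (PySem.List.index?_isSome_iff (xs := (PySem.List.pyRange (a+1) b 1).map g) (v := M')).mpr hmem
              exact Option.isSome_iff_exists.mp this
            rw [hj]
            simp
            omega
          · rw [if_neg hMm, if_neg (by omega : ¬ max (g a) M' > m)]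

-- ===== VERDICT (by name: the statement is the Claim_ definition above) =====
theorem ved_stolbec_spec : Claim_equal_ved_stolbec := by
  intro delts n _ _
  unfold Spec_ved_stolbec ved_stolbec ved_stolbec_alt
  have hA := loopA_char (fun i => PySem.List.pyGetD delts (i - 1) 0) (n + 1)
      ((n + 1) - 1).toNat 1 rfl 0 (-1)
  rw [hA]
  cases hM : PySem.List.max? ((PySem.List.pyRange 1 (n + 1) 1).map
      (fun i => PySem.List.pyGetD delts (i - 1) 0)) (fun x => x) with
  | none => simp [hM]
  | some M =>
      simp only [hM, Option.getD_some]
      by_cases h : M > 0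
      · simp only [if_pos h]
        ring
      · simp only [if_neg h]
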